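-- pv_equiv track=rewrite | github.com/hjkim22/Python_Coding_Test | 프로그래머스/1/42748. K번째수/K번째수.py | solution
-- ===== SOURCE A (Python) =====
-- def solution(array, commands):
--     answer = []
--     for command in commands:
--         i, j, k = command
--         sliced_array = array[i-1:j]
--         sorted_sliced_array = sorted(sliced_array)
--         answer.append(sorted_sliced_array[k-1])
--     return answer
-- ===== SOURCE B (Python) =====
-- def solution(array, commands):
--     answer = []
--     for i, j, k in commands:
--         # bounded-insertion selection: keep the k smallest values seen so far,
--         # in ascending order; the last one after the scan is the k-th smallest
--         best = []
--         for v in array[i-1:j]: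
--             if len(best) < k or v < best[-1]:
--                 lower = [x for x in best if x <= v]
--                 upper = [x for x in best if x > v]
--                 best = (lower + [v] + upper)[:k]
--         answer.append(best[k-1])
--     return answer
-- ===== Notes on version B (the rewrite author's own statement) =====
-- stated objective: alternative
-- what changed: Replaces sort-the-whole-slice-then-index with bounded-insertion selection: a scan that maintains only the k smallest values seen so far in ascending order, so the answer is the last of that bounded list (O(m*k) selection instead of O(m log m) full sort per command).
-- outside the precondition, e.g. on solution([1, 2, 3], [[1, 3, 0]]): A returns [3], B raises IndexError
import Mathlib
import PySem

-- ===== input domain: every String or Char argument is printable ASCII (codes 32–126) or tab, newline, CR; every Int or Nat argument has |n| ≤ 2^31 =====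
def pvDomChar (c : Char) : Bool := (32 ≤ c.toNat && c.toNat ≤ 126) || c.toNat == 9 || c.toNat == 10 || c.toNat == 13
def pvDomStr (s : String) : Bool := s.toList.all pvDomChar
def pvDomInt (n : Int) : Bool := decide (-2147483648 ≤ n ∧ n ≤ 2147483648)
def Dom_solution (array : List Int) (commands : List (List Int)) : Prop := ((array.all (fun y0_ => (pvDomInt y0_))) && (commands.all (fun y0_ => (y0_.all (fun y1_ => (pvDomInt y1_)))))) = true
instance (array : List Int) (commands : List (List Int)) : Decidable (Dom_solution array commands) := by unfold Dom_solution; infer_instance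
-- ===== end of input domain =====

-- B replaces sort-the-slice-then-index by a bounded-insertion selection that keeps only
-- the k smallest values seen so far (alternative algorithm; return-value equivalence on Pre_).

-- ===== PORT A =====
def solution (array : List Int) (commands : List (List Int)) : List Int :=
  commands.foldl (fun answer command =>
    match command with
    | [i, j, k] =>
      let sliced_array := PySem.List.slice array (some (i - 1)) (some j)
      let sorted_sliced_array := PySem.List.sorted sliced_array (fun x => x) false
      answer ++ [PySem.List.pyGetD sorted_sliced_array (k - 1) 0]
    | _ => answer) []   -- a command that is not a triple raises ValueError in Python: outside Pre_

-- ===== PORT B =====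
-- one step of the bounded insertion: keep the (at most k) smallest values seen, ascending
def selStep (k : Int) (best : List Int) (v : Int) : List Int :=
  if (best.length : Int) < k ∨ v < PySem.List.pyGetD best (-1) 0 then
    let lower := best.filter (fun x => x ≤ v)
    let upper := best.filter (fun x => v < x)
    PySem.List.slice (lower ++ [v] ++ upper) none (some k)
  else best

def solution_alt (array : List Int) (commands : List (List Int)) : List Int :=
  commands.foldl (fun answer command =>
    match command with
    | i :: rest =>
      match rest with
      | j :: rest2 =>
        match rest2 with
        | k :: rest3 =>
          match rest3 with
          | [] =>
            let best := (PySem.List.slice array (some (i - 1)) (some j)).foldl (selStep k) []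
            answer ++ [PySem.List.pyGetD best (k - 1) 0]
          | _ :: _ => answer
        | [] => answer
      | [] => answer
    | [] => answer) []

-- ===== PRECONDITION & SPEC =====
-- Pre_ excludes commands that are not triples (both raise ValueError), commands whose k
-- exceeds the slice length (both raise IndexError), and commands with k ≤ 0: there A's
-- negative index k-1 wraps around and returns a value from the top of the sorted slice,
-- while B's selection naturally raises IndexError.
def preCmd (array : List Int) (c : List Int) : Bool :=
  c.length == 3 &&
    decide (1 ≤ PySem.List.pyGetD c 2 0) &&
    decide (PySem.List.pyGetD c 2 0 ≤
      ((PySem.List.slice array (some (PySem.List.pyGetD c 0 0 - 1))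
        (some (PySem.List.pyGetD c 1 0))).length : Int))

def Pre_solution (array : List Int) (commands : List (List Int)) : Prop :=
  commands.all (preCmd array) = true
instance (array : List Int) (commands : List (List Int)) : Decidable (Pre_solution array commands) := by unfold Pre_solution; infer_instance

def pvWitness_solution : List Int × List (List Int) := ([3, 1, 2, 5], [[1, 3, 2], [2, 4, 1]])

def Spec_solution (array : List Int) (commands : List (List Int)) (out : List Int) : Prop := out = solution_alt array commands
instance (array : List Int) (commands : List (List Int)) (out : List Int) : Decidable (Spec_solution array commands out) := by unfold Spec_solution; infer_instance

-- ===== CLAIM (what is proved, stated in full; the proofs are below) =====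
def Claim_equal_solution : Prop := ∀ (array : List Int) (commands : List (List Int)), Dom_solution array commands → Pre_solution array commands → Spec_solution array commands (solution array commands)

-- ===== LEMMAS AND PROOFS =====

-- sorted insertion of v into an ascending list, as B's filters produce it
def insSorted (s : List Int) (v : Int) : List Int :=
  s.filter (fun x => x ≤ v) ++ v :: s.filter (fun x => v < x)

theorem insSorted_perm (s : List Int) (v : Int) : (insSorted s v).Perm (v :: s) := by
  unfold insSorted
  have h : (fun x : Int => decide (v < x)) = (fun x : Int => !decide (x ≤ v)) := by
    funext x
    by_cases hx : x ≤ v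
    · simp [hx]
    · simp [hx]; omega
  rw [h]
  exact List.perm_middle.trans (List.Perm.cons v (List.filter_append_perm _ s))

theorem insSorted_pairwise {s : List Int} (hs : s.Pairwise (· ≤ ·)) (v : Int) :
    (insSorted s v).Pairwise (· ≤ ·) := by
  unfold insSorted
  rw [List.pairwise_append]
  refine ⟨hs.filter _, ?_, ?_⟩
  · rw [List.pairwise_cons]
    refine ⟨fun b hb => ?_, hs.filter _⟩
    have := List.of_mem_filter hb
    simp at this; omega
  · intro a ha b hb
    have h1 := List.of_mem_filter ha
    simp at h1
    rcases List.mem_cons.mp hb with rfl | hb'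
    · omega
    · have h2 := List.of_mem_filter hb'
      simp at h2; omega

theorem sorted_append_singleton (p : List Int) (v : Int) :
    PySem.List.sorted (p ++ [v]) (fun x => x) false
      = insSorted (PySem.List.sorted p (fun x => x) false) v := by
  apply PySem.List.sorted_id_eq_of_perm_of_pairwise
  · refine (insSorted_perm _ v).trans ?_
    refine (List.Perm.cons v (PySem.List.sorted_perm p (fun x => x) false)).trans ?_
    simpa using (List.perm_middle (l₁ := p) (l₂ := []) (a := v)).symm
  · exact insSorted_pairwise (PySem.List.sorted_pairwise p (fun x => x)) v

theorem le_getLast_of_pairwise {l : List Int} (hl : l.Pairwise (· ≤ ·)) (hne : l ≠ []) :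
    ∀ a ∈ l, a ≤ l.getLast hne := by
  intro a ha
  rw [List.getLast_eq_getElem]
  obtain ⟨i, hi, rfl⟩ := List.mem_iff_getElem.mp ha
  by_cases h : i = l.length - 1
  · subst h; exact le_refl _
  · exact List.pairwise_iff_getElem.mp hl i (l.length - 1) hi (by omega) (by omega)

theorem selStep_take {s : List Int} (hs : s.Pairwise (· ≤ ·)) {k : Int} (hk : 1 ≤ k) (v : Int) :
    selStep k (s.take k.toNat) v = (insSorted s v).take k.toNat := by
  have hassoc : ∀ (a b : List Int), a ++ [v] ++ b = a ++ v :: b := by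
    intro a b; rw [List.append_assoc]; rfl
  by_cases hlen : s.length < k.toNat
  · -- short slice: best is all of s, condition holds, and nothing is cut off
    have htake : s.take k.toNat = s := List.take_of_length_le (by omega)
    rw [htake]
    unfold selStep
    rw [if_pos (Or.inl (by omega)), PySem.List.slice_to _ (by omega), hassoc]
    rfl
  · -- full window of the k smallest values so far
    rw [not_lt] at hlen
    have hbl : (s.take k.toNat).length = k.toNat := by simp [List.length_take]; omega
    have hne : s.take k.toNat ≠ [] := by
      intro h; rw [h] at hbl; simp at hbl; omega
    have hbp : (s.take k.toNat).Pairwise (· ≤ ·) := hs.sublist (List.take_sublist k.toNat s)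
    have hcross : ∀ a ∈ s.take k.toNat, ∀ b ∈ s.drop k.toNat, a ≤ b := by
      have h2 : (s.take k.toNat ++ s.drop k.toNat).Pairwise (· ≤ ·) := by
        rw [List.take_append_drop]; exact hs
      exact (List.pairwise_append.mp h2).2.2
    have hlastmem : (s.take k.toNat).getLast hne ∈ s.take k.toNat := List.getLast_mem hne
    have hgetD : PySem.List.pyGetD (s.take k.toNat) (-1) 0 = (s.take k.toNat).getLast hne :=
      PySem.List.pyGetD_neg_one _ _ hne
    by_cases hv : v < (s.take k.toNat).getLast hne
    · -- v displaces the current k-th smallest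
      have hdrop : ∀ b ∈ s.drop k.toNat, v < b := fun b hb =>
        lt_of_lt_of_le hv (hcross _ hlastmem _ hb)
      have hins : insSorted s v = insSorted (s.take k.toNat) v ++ s.drop k.toNat := by
        unfold insSorted
        conv_lhs => rw [← List.take_append_drop k.toNat s]
        rw [List.filter_append, List.filter_append]
        have h1 : (s.drop k.toNat).filter (fun x => decide (x ≤ v)) = [] := by
          rw [List.filter_eq_nil_iff]; intro b hb
          simp only [decide_eq_true_eq, not_le]; exact hdrop b hb
        have h2 : (s.drop k.toNat).filter (fun x => decide (v < x)) = s.drop k.toNat := by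
          rw [List.filter_eq_self]; intro b hb
          simp only [decide_eq_true_eq]; exact hdrop b hb
        rw [h1, h2]
        simp [List.append_assoc]
      have hl3 : (insSorted (s.take k.toNat) v).length = (s.take k.toNat).length + 1 := by
        simpa using (insSorted_perm (s.take k.toNat) v).length_eq
      unfold selStep
      rw [if_pos (Or.inr (by rw [hgetD]; exact hv)), PySem.List.slice_to _ (by omega), hassoc]
      have lhs_eq : (s.take k.toNat).filter (fun x => decide (x ≤ v)) ++
          v :: (s.take k.toNat).filter (fun x => decide (v < x)) = insSorted (s.take k.toNat) v := rfl
      rw [lhs_eq, hins, List.take_append_of_le_length (by omega)]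
    · -- v is at least the current k-th smallest: best is unchanged
      have hle : ∀ a ∈ s.take k.toNat, a ≤ v := fun a ha =>
        le_trans (le_getLast_of_pairwise hbp hne a ha) (not_lt.mp hv)
      have hf1 : (s.take k.toNat).filter (fun x => decide (x ≤ v)) = s.take k.toNat := by
        rw [List.filter_eq_self]; intro a ha
        simp only [decide_eq_true_eq]; exact hle a ha
      have hins : insSorted s v = s.take k.toNat ++
          (((s.drop k.toNat).filter (fun x => decide (x ≤ v))) ++
            v :: ((s.take k.toNat).filter (fun x => decide (v < x)) ++
              (s.drop k.toNat).filter (fun x => decide (v < x)))) := by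
        unfold insSorted
        conv_lhs => rw [← List.take_append_drop k.toNat s]
        rw [List.filter_append, List.filter_append, hf1, List.append_assoc]
      unfold selStep
      rw [if_neg ?_]
      · rw [hins, List.take_append_of_le_length (by omega),
            List.take_of_length_le (le_of_eq hbl)]
      · intro hcond
        rcases hcond with h | h
        · rw [hbl] at h; omega
        · rw [hgetD] at h; exact hv h

theorem foldl_selStep_eq {k : Int} (hk : 1 ≤ k) (p : List Int) :
    p.foldl (selStep k) [] = (PySem.List.sorted p (fun x => x) false).take k.toNat := by
  induction p using List.reverseRecOn with
  | nil => simp [PySem.List.sorted]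
  | append_singleton p v ih =>
    rw [List.foldl_append]
    simp only [List.foldl_cons, List.foldl_nil]
    rw [ih, sorted_append_singleton]
    exact selStep_take (by simpa using PySem.List.sorted_pairwise p (fun x : Int => x)) hk v

theorem cmd_eq (array : List Int) (i j k : Int) (h1 : 1 ≤ k)
    (h2 : k ≤ ((PySem.List.slice array (some (i - 1)) (some j)).length : Int)) :
    PySem.List.pyGetD
      (PySem.List.sorted (PySem.List.slice array (some (i - 1)) (some j)) (fun x => x) false)
      (k - 1) 0
    = PySem.List.pyGetD
      ((PySem.List.slice array (some (i - 1)) (some j)).foldl (selStep k) []) (k - 1) 0 := by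
  set s := PySem.List.slice array (some (i - 1)) (some j) with hs
  rw [foldl_selStep_eq h1]
  set t := PySem.List.sorted s (fun x => x) false with ht
  have hlt : t.length = s.length := PySem.List.length_sorted s _ _
  have hlen2 : (t.take k.toNat).length = k.toNat := by
    simp [List.length_take]; omega
  rw [PySem.List.pyGetD_eq_getElem _ _ (by omega) (by rw [hlt]; omega),
      PySem.List.pyGetD_eq_getElem _ _ (by omega) (by rw [hlen2]; omega)]
  exact (List.getElem_take).symm

theorem fold_eq (array : List Int) (cmds : List (List Int)) :
    cmds.all (preCmd array) = true → ∀ acc : List Int,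
      cmds.foldl (fun answer command =>
        match command with
        | [i, j, k] =>
          let sliced_array := PySem.List.slice array (some (i - 1)) (some j)
          let sorted_sliced_array := PySem.List.sorted sliced_array (fun x => x) false
          answer ++ [PySem.List.pyGetD sorted_sliced_array (k - 1) 0]
        | _ => answer) acc
      = cmds.foldl (fun answer command =>
        match command with
        | i :: rest =>
          match rest with
          | j :: rest2 =>
            match rest2 with
            | k :: rest3 =>
              match rest3 with
              | [] =>
                let best := (PySem.List.slice array (some (i - 1)) (some j)).foldl (selStep k) []
                answer ++ [PySem.List.pyGetD best (k - 1) 0]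
              | _ :: _ => answer
            | [] => answer
          | [] => answer
        | [] => answer) acc := by
  induction cmds with
  | nil => intro _ _; rfl
  | cons c rest ih =>
    intro hpre acc
    rw [List.all_cons, Bool.and_eq_true] at hpre
    obtain ⟨hc, hrest⟩ := hpre
    match c, hc with
    | [], hc => simp [preCmd] at hc
    | [_], hc => simp [preCmd] at hc
    | [_, _], hc => simp [preCmd] at hc
    | _ :: _ :: _ :: _ :: _, hc => simp [preCmd] at hc
    | [i, j, k], hc =>
      simp only [preCmd, Bool.and_eq_true, decide_eq_true_eq] at hc
      have h1 : (1 : Int) ≤ k := by simpa using hc.1.2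
      have h2 : k ≤ ((PySem.List.slice array (some (i - 1)) (some j)).length : Int) := by
        simpa using hc.2
      simp only [List.foldl_cons]
      rw [cmd_eq array i j k h1 h2]
      exact ih hrest _

-- ===== VERDICT (by name: the statement is the Claim_ definition above) =====
theorem solution_spec : Claim_equal_solution := by
  intro array commands _hdom hpre
  unfold Spec_solution solution solution_alt
  exact fold_eq array commands hpre []
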